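-- pv_equiv track=rewrite | github.com/mykespb/leetcoding | lc-harmonicseq.py | solve
-- ===== SOURCE A (Python) =====
-- import itertools
--
-- def solve(nums):
--     """solve complete task"""
--
--     nlen = len(nums)
--     longest = 0
--
--     for n in range(2**nlen):
--         pattern = [int(x) for x in list(f"{n:0{nlen}b}")]
--         selected = list(itertools.compress(nums, pattern))
--
--         if not selected:
--             continue
--         if max(selected) - min(selected) == 1:
--             longest = max(longest, len(selected))
--
--     return longest
-- ===== SOURCE B (Python) =====
-- def solve(nums):
--     """solve complete task"""
--     cnt = {}
--     for x in nums:
--         cnt[x] = cnt.get(x, 0) + 1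
--     best = 0
--     for v, c in cnt.items():
--         if v + 1 in cnt:
--             best = max(best, c + cnt[v + 1])
--     return best
-- ===== Notes on version B (the rewrite author's own statement) =====
-- stated objective: faster
-- what changed: replaces the 2^n enumeration of all subsets (checking max-min==1 on each) by a single frequency-count pass followed by a max over count[v]+count[v+1] for values v with v+1 also present
import Mathlib
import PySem

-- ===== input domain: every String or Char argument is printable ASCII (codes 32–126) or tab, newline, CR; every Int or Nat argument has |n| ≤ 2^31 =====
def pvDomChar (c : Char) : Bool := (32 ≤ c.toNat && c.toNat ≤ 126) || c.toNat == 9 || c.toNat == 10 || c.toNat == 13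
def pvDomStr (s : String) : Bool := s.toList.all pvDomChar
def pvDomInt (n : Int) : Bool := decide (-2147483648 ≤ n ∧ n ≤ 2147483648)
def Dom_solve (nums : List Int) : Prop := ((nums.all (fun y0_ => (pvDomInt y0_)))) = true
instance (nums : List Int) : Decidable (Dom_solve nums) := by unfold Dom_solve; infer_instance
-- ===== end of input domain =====

-- B replaces A's O(2^n) subset enumeration by one O(n) counting pass and a max over count[v]+count[v+1].

-- ===== PORT A =====
-- binary digits of n (msb first), as in bin(n) without the '0b' prefix; pyBinDigits 0 = []
def pyBinDigits : Nat → List Int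
  | 0 => []
  | (n+1) => pyBinDigits ((n+1)/2) ++ [(((n+1) % 2 : Nat) : Int)]

-- f"{n:b}" as a digit list (str(0) is "0")
def pyBinRepr (n : Nat) : List Int := if n = 0 then [0] else pyBinDigits n

-- [int(x) for x in list(f"{n:0{L}b}")] : left-pad with 0 to width L   (exact for n ≥ 0)
def pyPad (L : Nat) (n : Nat) : List Int :=
  List.replicate (L - (pyBinRepr n).length) 0 ++ pyBinRepr n

-- list(itertools.compress(xs, pat)) : elements of xs whose pattern entry is truthy (stops at the shorter)
def pyCompress (xs : List Int) (pat : List Int) : List Int :=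
  (xs.zip pat).filterMap (fun p => if p.2 ≠ 0 then some p.1 else none)

-- max(sel)/min(sel) on the nonempty list x :: t are the running folds (PySem.List.max?_id_cons / min?_id_cons)
def solve (nums : List Int) : Int :=
  (PySem.List.pyRange 0 ((2:Int)^nums.length) 1).foldl (fun longest n =>
    let pattern := pyPad nums.length n.toNat   -- n ≥ 0 for every n in range(2**nlen)
    let selected := pyCompress nums pattern
    match selected with
    | [] => longest
    | x :: t => if (t.foldl max x) - (t.foldl min x) = 1
                then max longest ((x :: t).length : Int) else longest) 0

-- ===== PORT B =====
def solve_alt (nums : List Int) : Int :=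
  let cnt := nums.foldl (fun d x => d.insert x (d.getD x 0 + 1)) PySem.Dict.empty
  cnt.items.foldl (fun best p =>
    if cnt.contains (p.1 + 1) then max best (p.2 + cnt.getD (p.1 + 1) 0) else best) 0

-- ===== PRECONDITION & SPEC =====
def Spec_solve (nums : List Int) (out : Int) : Prop := out = solve_alt nums
instance (nums : List Int) (out : Int) : Decidable (Spec_solve nums out) := by unfold Spec_solve; infer_instance

-- ===== CLAIM (what is proved, stated in full; the proofs are below) =====
def Claim_equal_solve : Prop := ∀ (nums : List Int), Dom_solve nums → Spec_solve nums (solve nums)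

-- ===== LEMMAS AND PROOFS =====

-- fixed-width binary digits, msb first (proof-side characterisation of pyPad)
def digitsL : Nat → Nat → List Int
  | 0, _ => []
  | (L+1), n => digitsL L (n/2) ++ [((n % 2 : Nat) : Int)]

-- the contribution of one mask n to A's running maximum
def gA (nums : List Int) (n : Int) : Int :=
  match pyCompress nums (pyPad nums.length n.toNat) with
  | [] => 0
  | x :: t => if (t.foldl max x) - (t.foldl min x) = 1 then ((x :: t).length : Int) else 0

-- the contribution of one counter item p to B's running maximum
def gB (cnt : PySem.Dict Int Int) (p : Int × Int) : Int :=
  if cnt.contains (p.1 + 1) then p.2 + cnt.getD (p.1 + 1) 0 else 0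

theorem pyBinDigits_pos (n : Nat) (h : 0 < n) :
    pyBinDigits n = pyBinDigits (n/2) ++ [((n % 2 : Nat) : Int)] := by
  cases n with
  | zero => omega
  | succ m => conv_lhs => rw [pyBinDigits]

theorem pyPad_step (L n : Nat) (hL : 1 ≤ L) :
    pyPad (L+1) n = pyPad L (n/2) ++ [((n % 2 : Nat) : Int)] := by
  have hrep : List.replicate L (0:Int) = List.replicate (L-1) 0 ++ [0] := by
    rw [← List.replicate_succ']; congr 1; omega
  have h1 : pyBinDigits 1 = [1] := by
    rw [pyBinDigits_pos 1 (by omega)]; simp [pyBinDigits]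
  rcases Nat.lt_or_ge n 2 with h2 | h2
  · interval_cases n
    · simp [pyPad, pyBinRepr, hrep]
    · simp [pyPad, pyBinRepr, h1, hrep]
  · have hq : 0 < n / 2 := by omega
    have hn : 0 < n := by omega
    simp only [pyPad, pyBinRepr, if_neg (by omega : ¬ n = 0), if_neg (by omega : ¬ n/2 = 0)]
    rw [pyBinDigits_pos n hn]
    rw [List.length_append]
    simp only [List.length_singleton]
    rw [show L + 1 - ((pyBinDigits (n/2)).length + 1) = L - (pyBinDigits (n/2)).length by omega]
    simp [List.append_assoc]

theorem pyPad_eq_digitsL : ∀ (L n : Nat), 1 ≤ L → n < 2^L → pyPad L n = digitsL L n := by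
  intro L
  induction L with
  | zero => omega
  | succ K ih =>
    intro n _ hn
    rcases Nat.eq_or_lt_of_le (show 1 ≤ K + 1 by omega) with hK | hK
    · have : K = 0 := by omega
      subst this
      have h1 : pyBinDigits 1 = [1] := by
        rw [pyBinDigits_pos 1 (by omega)]; simp [pyBinDigits]
      interval_cases n <;> simp [pyPad, pyBinRepr, digitsL, h1]
    · have hK1 : 1 ≤ K := by omega
      rw [pyPad_step K n hK1, digitsL,
        ih (n/2) hK1 (by
          have := Nat.pow_succ 2 K
          omega)]

theorem digitsL_surj : ∀ (bs : List Int), (∀ b ∈ bs, b = 0 ∨ b = 1) →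
    ∃ m : Nat, m < 2^bs.length ∧ digitsL bs.length m = bs := by
  intro bs
  induction bs using List.reverseRecOn with
  | nil => intro _; exact ⟨0, by simp [digitsL]⟩
  | append_singleton bs b ih =>
    intro h
    obtain ⟨m, hm, hd⟩ := ih (fun x hx => h x (by simp [hx]))
    have hb := h b (by simp)
    refine ⟨2 * m + b.toNat, ?_, ?_⟩
    · have : b.toNat ≤ 1 := by rcases hb with rfl | rfl <;> simp
      simp only [List.length_append, List.length_singleton, Nat.pow_succ]
      omega
    · simp only [List.length_append, List.length_singleton, digitsL]
      have h2 : (2 * m + b.toNat) / 2 = m := by rcases hb with rfl | rfl <;> omega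
      have h3 : ((2 * m + b.toNat) % 2 : Nat) = b.toNat := by rcases hb with rfl | rfl <;> omega
      rw [h2, h3, hd]
      rcases hb with rfl | rfl <;> simp

theorem pyCompress_sublist (xs pat : List Int) : (pyCompress xs pat).Sublist xs := by
  induction xs generalizing pat with
  | nil => simp [pyCompress]
  | cons x t ih =>
    cases pat with
    | nil => simp [pyCompress]
    | cons b pb =>
      by_cases hb : b = 0
      · simpa [pyCompress, hb] using (ih pb).cons x
      · simpa [pyCompress, hb] using (ih pb).cons₂ x

theorem pyCompress_indicator (P : Int → Prop) [DecidablePred P] (xs : List Int) :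
    pyCompress xs (xs.map (fun x => if P x then (1:Int) else 0)) =
      xs.filter (fun x => decide (P x)) := by
  induction xs with
  | nil => rfl
  | cons x t ih =>
    by_cases h : P x <;> simp [pyCompress, h] <;> simpa [pyCompress] using ih

-- a fold whose body is `max acc (g n)` whenever acc ≥ 0
theorem foldl_shape {α : Type} (l : List α) (f : Int → α → Int) (g : α → Int)
    (h : ∀ a n, 0 ≤ a → f a n = max a (g n)) :
    ∀ a : Int, 0 ≤ a → l.foldl f a = l.foldl (fun a n => max a (g n)) a := by
  induction l with
  | nil => intros; rfl
  | cons x t ih =>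
    intro a ha
    simp only [List.foldl_cons, h a x ha]
    exact ih _ (le_trans ha (le_max_left _ _))

theorem foldl_max_le_int {α : Type} (l : List α) (g : α → Int) :
    ∀ (a B : Int), a ≤ B → (∀ x ∈ l, g x ≤ B) → l.foldl (fun a n => max a (g n)) a ≤ B := by
  induction l with
  | nil => intro a B h _; simpa using h
  | cons x t ih =>
    intro a B ha hall
    exact ih _ _ (max_le ha (hall x (by simp))) (fun y hy => hall y (by simp [hy]))

theorem length_eq_count_add_count (l : List Int) (a b : Int) (hab : a ≠ b)
    (h : ∀ x ∈ l, x = a ∨ x = b) : (l.length : Int) = l.count a + l.count b := by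
  induction l with
  | nil => simp
  | cons x t ih =>
    have hx := h x (by simp)
    have ht := ih (fun y hy => h y (by simp [hy]))
    rcases hx with rfl | rfl <;> simp [hab, hab.symm, ht] <;> omega

-- A's loop is the running maximum of gA over the range
theorem solveA_shape (nums : List Int) :
    solve nums = (PySem.List.pyRange 0 ((2:Int)^nums.length) 1).foldl
      (fun a n => max a (gA nums n)) 0 := by
  unfold solve
  apply foldl_shape _ _ _ _ 0 le_rfl
  intro a n ha
  simp only [gA]
  cases h : pyCompress nums (pyPad nums.length n.toNat) with
  | nil => exact (max_eq_left ha).symm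
  | cons x t =>
    dsimp only
    split_ifs with hc
    · rfl
    · exact (max_eq_left ha).symm

-- B's loop is the running maximum of gB over the counter items
theorem solveB_shape (nums : List Int) :
    solve_alt nums = (PySem.Dict.counter nums).items.foldl
      (fun a p => max a (gB (PySem.Dict.counter nums) p)) 0 := by
  unfold solve_alt
  rw [PySem.Dict.foldl_insert_getD_add_one_eq_counter]
  apply foldl_shape _ _ _ _ 0 le_rfl
  intro a p ha
  simp only [gB]
  split_ifs with hc
  · rfl
  · exact (max_eq_left ha).symm

theorem solve_eq (nums : List Int) : solve nums = solve_alt nums := by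
  rw [solveA_shape, solveB_shape]
  set cnt := PySem.Dict.counter nums with hcnt
  set L := nums.length with hL
  apply le_antisymm
  · -- A ≤ B : each selected subsequence with max - min = 1 is dominated by some counter term
    apply foldl_max_le_int
    · exact (PySem.List.le_foldl_max_int cnt.items (gB cnt) 0).1
    · intro n _
      have hB0 := (PySem.List.le_foldl_max_int cnt.items (gB cnt) 0).1
      simp only [gA]
      cases h : pyCompress nums (pyPad L n.toNat) with
      | nil => exact hB0
      | cons x t =>
        dsimp only
        split_ifs with hc
        · -- the selected list sel = x :: t has max - min = 1
          have hsub : (x :: t).Sublist nums := h ▸ pyCompress_sublist nums _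
          set mx := t.foldl max x with hmx
          set mn := t.foldl min x with hmn
          have hmaxall : ∀ y ∈ x :: t, y ≤ mx := by
            intro y hy
            rcases List.mem_cons.1 hy with rfl | hy'
            · exact (PySem.List.le_foldl_max t y).1
            · exact (PySem.List.le_foldl_max t x).2 y hy'
          have hminall : ∀ y ∈ x :: t, mn ≤ y := by
            intro y hy
            rcases List.mem_cons.1 hy with rfl | hy'
            · exact (PySem.List.foldl_min_le t y).1
            · exact (PySem.List.foldl_min_le t x).2 y hy'
          have hmem_mn : mn ∈ x :: t := by
            rcases PySem.List.foldl_min_mem t x with he | ht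
            · rw [hmn, he]; simp
            · exact List.mem_cons_of_mem x (hmn ▸ ht)
          have hmem_mx : mx ∈ x :: t := by
            rcases PySem.List.foldl_max_mem t x with he | ht
            · rw [hmx, he]; simp
            · exact List.mem_cons_of_mem x (hmx ▸ ht)
          have hall : ∀ y ∈ x :: t, y = mn ∨ y = mn + 1 := by
            intro y hy
            have h1 := hmaxall y hy
            have h2 := hminall y hy
            omega
          have hlen : ((x :: t).length : Int) =
              (x :: t).count mn + (x :: t).count (mn + 1) :=
            length_eq_count_add_count _ mn (mn + 1) (by omega) hall
          have hmn_nums : mn ∈ nums := hsub.subset hmem_mn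
          have hmx_nums : mn + 1 ∈ nums := by
            have : mx = mn + 1 := by omega
            exact hsub.subset (this ▸ hmem_mx)
          -- the counter term at key mn dominates
          have hitem : (mn, (nums.count mn : Int)) ∈ cnt.items := by
            rw [hcnt, PySem.Dict.items_counter]
            exact List.mem_map.2 ⟨mn, (PySem.Set.mem_ofList nums mn).2 hmn_nums, rfl⟩
          have hterm := (PySem.List.le_foldl_max_int cnt.items (gB cnt) 0).2 _ hitem
          have hcontains : cnt.contains (mn + 1) = true := by
            rw [hcnt, PySem.Dict.contains_counter]
            simpa using hmx_nums
          have hgB : gB cnt (mn, (nums.count mn : Int)) =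
              (nums.count mn : Int) + (nums.count (mn + 1) : Int) := by
            simp only [gB, hcontains, if_true]
            rw [hcnt, PySem.Dict.getD_counter]
          have hc1 : (x :: t).count mn ≤ nums.count mn := hsub.count_le mn
          have hc2 : (x :: t).count (mn + 1) ≤ nums.count (mn + 1) := hsub.count_le (mn + 1)
          rw [hgB] at hterm
          have := hlen
          push_cast at this hterm ⊢
          omega
        · exact hB0
  · -- B ≤ A : each counter term count[k]+count[k+1] is realised by the mask selecting {k, k+1}
    apply foldl_max_le_int
    · exact (PySem.List.le_foldl_max_int _ (gA nums) 0).1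
    · intro p hp
      have hA0 := (PySem.List.le_foldl_max_int (PySem.List.pyRange 0 ((2:Int)^L) 1) (gA nums) 0).1
      rw [hcnt, PySem.Dict.items_counter] at hp
      obtain ⟨k, hk, rfl⟩ := List.mem_map.1 hp
      have hk_nums : k ∈ nums := (PySem.Set.mem_ofList nums k).1 hk
      simp only [gB]
      split_ifs with hcont
      · have hk1_nums : k + 1 ∈ nums := by
          rw [hcnt, PySem.Dict.contains_counter] at hcont
          simpa using hcont
        -- the indicator mask for {k, k+1}
        have hLpos : 1 ≤ L := by
          rw [hL]
          cases nums with
          | nil => cases hk_nums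
          | cons _ _ => simp
        set bs := nums.map (fun x => if x = k ∨ x = k + 1 then (1:Int) else 0) with hbs
        have hbs01 : ∀ b ∈ bs, b = 0 ∨ b = 1 := by
          intro b hb
          rw [hbs] at hb
          obtain ⟨x, _, rfl⟩ := List.mem_map.1 hb
          split_ifs <;> simp
        have hbslen : bs.length = L := by simp [hbs, hL]
        obtain ⟨m, hm, hd⟩ := digitsL_surj bs hbs01
        rw [hbslen] at hm hd
        have hpad : pyPad L m = bs := by rw [pyPad_eq_digitsL L m hLpos hm, hd]
        have hpad' : pyPad nums.length m = bs := hL ▸ hpad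
        have hmem_range : (m : Int) ∈ PySem.List.pyRange 0 ((2:Int)^L) 1 := by
          rw [PySem.List.mem_pyRange_one]
          constructor
          · positivity
          · exact_mod_cast hm
        have hterm := (PySem.List.le_foldl_max_int _ (gA nums) 0).2 _ hmem_range
        -- compute gA at this mask
        have hsel : pyCompress nums (pyPad nums.length ((m : Int)).toNat) =
            nums.filter (fun x => decide (x = k ∨ x = k + 1)) := by
          rw [show ((m : Int)).toNat = m by simp, hpad', hbs]
          exact pyCompress_indicator (fun x => x = k ∨ x = k + 1) nums
        set sel := nums.filter (fun x => decide (x = k ∨ x = k + 1)) with hseldef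
        have hk_sel : k ∈ sel := List.mem_filter.2 ⟨hk_nums, by simp⟩
        have hk1_sel : k + 1 ∈ sel := List.mem_filter.2 ⟨hk1_nums, by simp⟩
        have hsel_mem : ∀ y ∈ sel, y = k ∨ y = k + 1 := by
          intro y hy
          have := (List.mem_filter.1 hy).2
          simpa using this
        cases hselc : sel with
        | nil => rw [hselc] at hk_sel; cases hk_sel
        | cons x t =>
          have hmaxk : t.foldl max x = k + 1 := by
              have hmem : t.foldl max x ∈ x :: t := by
                rcases PySem.List.foldl_max_mem t x with he | ht
                · rw [he]; simp
                · exact List.mem_cons_of_mem x ht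
              have hub := hsel_mem _ (hselc ▸ hmem)
              have hge : k + 1 ≤ t.foldl max x := by
                have := hselc ▸ hk1_sel
                rcases List.mem_cons.1 this with he | ht
                · rw [he]; exact (PySem.List.le_foldl_max t x).1
                · exact (PySem.List.le_foldl_max t x).2 _ ht
              omega
          have hmink : t.foldl min x = k := by
              have hmem : t.foldl min x ∈ x :: t := by
                rcases PySem.List.foldl_min_mem t x with he | ht
                · rw [he]; simp
                · exact List.mem_cons_of_mem x ht
              have hub := hsel_mem _ (hselc ▸ hmem)
              have hle : t.foldl min x ≤ k := by
                have := hselc ▸ hk_sel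
                rcases List.mem_cons.1 this with he | ht
                · rw [he]; exact (PySem.List.foldl_min_le t x).1
                · exact (PySem.List.foldl_min_le t x).2 _ ht
              omega
          have hgA : gA nums (m : Int) = (sel.length : Int) := by
            simp only [gA]
            rw [hsel, hselc]
            dsimp only
            rw [hmaxk, hmink, show k + 1 - k = (1:Int) by ring, if_pos rfl, ← hselc]
          have hlen : (sel.length : Int) = nums.count k + nums.count (k + 1) := by
            have h1 : (sel.length : Int) = sel.count k + sel.count (k + 1) :=
              length_eq_count_add_count sel k (k + 1) (by omega) hsel_mem
            have h2 : sel.count k = nums.count k := by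
              rw [hseldef]; exact List.count_filter (by simp)
            have h3 : sel.count (k + 1) = nums.count (k + 1) := by
              rw [hseldef]; exact List.count_filter (by simp)
            rw [h1, h2, h3]
          have hgB : (nums.count k : Int) + cnt.getD (k + 1) 0 =
              (nums.count k : Int) + (nums.count (k + 1) : Int) := by
            rw [hcnt, PySem.Dict.getD_counter]
          rw [hgB]
          calc (nums.count k : Int) + (nums.count (k + 1) : Int)
              = gA nums (m : Int) := by rw [hgA, hlen]
            _ ≤ _ := hterm
      · exact hA0

-- ===== VERDICT (by name: the statement is the Claim_ definition above) =====
theorem solve_spec : Claim_equal_solve := by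
  intro nums _
  exact solve_eq nums
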